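-- pv_equiv track=rewrite | github.com/rshon/algorithm-inside | Chapter09/문제 27_remove_duplicates_from_array.py | remove_continuous_duplicates
-- ===== SOURCE A (Python) =====
-- from typing import List
--
-- def remove_continuous_duplicates(nums: List[int]) -> int:
--     if not nums:
--         return 0
--
--     l = 0
--     r = 1
--     dup = 0
--
--     while r < len(nums):
--         if nums[l] != nums[r]:
--             l += 1
--             nums[l] = nums[r]
--             dup = 0
--         elif dup == 0:
--             l += 1
--             nums[l] = nums[r]
--             dup += 1
--
--         r += 1
--
--     return l + 1
-- ===== SOURCE B (Python) =====
-- from typing import List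
-- from itertools import groupby
--
-- def remove_continuous_duplicates(nums: List[int]) -> int:
--     result = []
--     for _, grp in groupby(nums):
--         run = list(grp)
--         result.extend(run[:2])
--     for i, v in enumerate(result):
--         nums[i] = v
--     return len(result)
-- ===== Notes on version B (the rewrite author's own statement) =====
-- stated objective: idiomatic
-- what changed: Replaces the two-pointer in-place compaction scan with itertools.groupby over consecutive runs, keeping at most two copies per run and writing the result prefix back by index.
import Mathlib
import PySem

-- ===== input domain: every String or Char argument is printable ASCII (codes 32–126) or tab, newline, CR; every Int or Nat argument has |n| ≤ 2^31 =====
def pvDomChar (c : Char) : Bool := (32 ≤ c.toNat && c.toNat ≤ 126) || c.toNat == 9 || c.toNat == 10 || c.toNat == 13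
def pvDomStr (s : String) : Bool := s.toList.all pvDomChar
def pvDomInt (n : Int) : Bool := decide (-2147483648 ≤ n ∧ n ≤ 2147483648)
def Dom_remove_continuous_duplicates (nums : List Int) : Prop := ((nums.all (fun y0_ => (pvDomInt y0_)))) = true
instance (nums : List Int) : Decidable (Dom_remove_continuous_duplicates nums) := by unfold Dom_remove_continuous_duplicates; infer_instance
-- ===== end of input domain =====

-- B replaces A's two-pointer in-place compaction with groupby-style run grouping (keep at most
-- two copies per consecutive run); equivalence proved about the RETURN value only (both Pythons
-- also overwrite the prefix of nums in place, identically on tested inputs, but that is not claimed).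

-- ===== PORT A =====
-- while r < len(nums): two-pointer scan mutating nums in place; l, r, dup as in the source.
def remove_continuous_duplicates_loop (nums : List Int) (l r : Nat) (dup : Int) : Int :=
  if _h : r < nums.length then
    let vl := (nums[l]?).getD 0   -- nums[l], always in range when reached
    let vr := (nums[r]?).getD 0   -- nums[r]
    if vl ≠ vr then
      remove_continuous_duplicates_loop (nums.set (l+1) vr) (l+1) (r+1) 0
    else if dup = 0 then
      remove_continuous_duplicates_loop (nums.set (l+1) vr) (l+1) (r+1) (dup+1)
    else
      remove_continuous_duplicates_loop nums l (r+1) dup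
  else
    (l : Int) + 1
termination_by nums.length - r
decreasing_by
  · simp only [List.length_set]; omega
  · simp only [List.length_set]; omega
  · omega

def remove_continuous_duplicates (nums : List Int) : Int :=
  if nums = [] then 0
  else remove_continuous_duplicates_loop nums 0 1 0

-- ===== PORT B =====
-- groupby(nums): for each consecutive run, extend the result with at most two copies; return len(result).
def rcd_groups (l : List Int) : List Int :=
  match l with
  | [] => []
  | x :: xs =>
      (x :: xs.takeWhile (· = x)).take 2 ++ rcd_groups (xs.dropWhile (· = x))
termination_by l.length
decreasing_by
  simp only [List.length_cons]
  exact Nat.lt_succ_of_le (List.length_dropWhile_le _ _)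

def remove_continuous_duplicates_alt (nums : List Int) : Int :=
  ((rcd_groups nums).length : Int)

-- ===== PRECONDITION & SPEC =====
def Spec_remove_continuous_duplicates (nums : List Int) (out : Int) : Prop := out = remove_continuous_duplicates_alt nums
instance (nums : List Int) (out : Int) : Decidable (Spec_remove_continuous_duplicates nums out) := by unfold Spec_remove_continuous_duplicates; infer_instance

-- ===== CLAIM (what is proved, stated in full; the proofs are below) =====
def Claim_equal_remove_continuous_duplicates : Prop := ∀ (nums : List Int), Dom_remove_continuous_duplicates nums → Spec_remove_continuous_duplicates nums (remove_continuous_duplicates nums)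

-- ===== LEMMAS AND PROOFS =====

-- Pure count of the further elements A keeps, given the last written value and the dup flag.
def rcdCount (last : Int) (dup : Int) (rest : List Int) : Int :=
  match rest with
  | [] => 0
  | x :: xs =>
      if last ≠ x then 1 + rcdCount x 0 xs
      else if dup = 0 then 1 + rcdCount x 1 xs
      else rcdCount last dup xs

lemma rcd_loop_eq (n : Nat) :
    ∀ (nums : List Int) (l r : Nat) (dup : Int), nums.length - r ≤ n → l < r →
      remove_continuous_duplicates_loop nums l r dup =
        (l : Int) + 1 + rcdCount ((nums[l]?).getD 0) dup (nums.drop r) := by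
  induction n with
  | zero =>
      intro nums l r dup hn _
      rw [remove_continuous_duplicates_loop]
      have hr : ¬ r < nums.length := by omega
      have hd : nums.drop r = [] := List.drop_eq_nil_of_le (by omega)
      simp [hr, hd, rcdCount]
  | succ n ih =>
      intro nums l r dup hn hlr
      rw [remove_continuous_duplicates_loop]
      by_cases hr : r < nums.length
      · have hl : l < nums.length := by omega
        have hdrop : nums.drop r = nums[r] :: nums.drop (r+1) :=
          List.drop_eq_getElem_cons hr
        have hvl : (nums[l]?).getD 0 = nums[l] := by simp [List.getElem?_eq_getElem hl]
        have hvr : (nums[r]?).getD 0 = nums[r] := by simp [List.getElem?_eq_getElem hr]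
        by_cases hne : nums[l] ≠ nums[r]
        · simp only [hr, dif_pos, hvl, hvr, hne, if_pos, ne_eq, not_false_iff, if_true]
          have hset_len : (nums.set (l+1) nums[r]).length = nums.length := by simp
          rw [ih (nums.set (l+1) nums[r]) (l+1) (r+1) 0 (by omega) (by omega)]
          have h1 : ((nums.set (l+1) nums[r])[l+1]?).getD 0 = nums[r] := by
            rw [List.getElem?_set_self (by omega)]; simp
          have h2 : (nums.set (l+1) nums[r]).drop (r+1) = nums.drop (r+1) := by
            rw [List.drop_set]
            simp [Nat.lt_iff_add_one_le.mp (Nat.lt_of_lt_of_le hlr (Nat.le_refl r))]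
          rw [h1, h2, hdrop, rcdCount, if_pos hne]
          push_cast; ring
        · push_neg at hne
          by_cases hdup : dup = 0
          · simp only [hr, dif_pos, hvl, hvr, hne, ne_eq, not_true_eq_false, if_false,
              hdup, if_pos]
            rw [ih (nums.set (l+1) nums[r]) (l+1) (r+1) (0+1) (by simp; omega) (by omega)]
            have h1 : ((nums.set (l+1) nums[r])[l+1]?).getD 0 = nums[r] := by
              rw [List.getElem?_set_self (by omega)]; simp
            have h2 : (nums.set (l+1) nums[r]).drop (r+1) = nums.drop (r+1) := by
              rw [List.drop_set]; simp; omega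
            rw [h1, h2, hdrop, rcdCount]
            simp only [hne, ne_eq, not_true_eq_false, if_false, if_pos]
            push_cast; ring
          · simp only [hr, dif_pos, hvl, hvr, hne, ne_eq, not_true_eq_false, if_false, hdup]
            rw [ih nums l (r+1) dup (by omega) (by omega)]
            rw [hdrop, rcdCount]
            simp [hne, hdup, hvl]
      · have hd : nums.drop r = [] := List.drop_eq_nil_of_le (by omega)
        simp [hr, hd, rcdCount]

-- B side: length of the grouped result, related to rcdCount (mutual statement, by induction on a bound).
lemma rcd_groups_eq (n : Nat) :
    ∀ (xs : List Int), xs.length ≤ n →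
      (∀ x : Int, ((rcd_groups (x :: xs)).length : Int) = 1 + rcdCount x 0 xs) ∧
      (∀ x : Int, rcdCount x 1 xs = ((rcd_groups (xs.dropWhile (· = x))).length : Int)) := by
  induction n with
  | zero =>
      intro xs hxs
      have hnil : xs = [] := List.eq_nil_of_length_eq_zero (by omega)
      subst hnil
      exact ⟨fun x => by simp [rcd_groups, rcdCount],
             fun x => by simp [rcd_groups, rcdCount, List.dropWhile]⟩
  | succ n ih =>
      intro xs hxs
      match xs with
      | [] =>
          exact ⟨fun x => by simp [rcd_groups, rcdCount],
                 fun x => by simp [rcd_groups, rcdCount, List.dropWhile]⟩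
      | y :: ys =>
          have hys : ys.length ≤ n := by simpa using hxs
          obtain ⟨ih1, ih2⟩ := ih ys hys
          refine ⟨fun x => ?_, fun x => ?_⟩
          · by_cases hxy : y = x
            · subst hxy
              rw [rcd_groups, rcdCount]
              simp [List.takeWhile_cons, List.dropWhile_cons, ih2 y]
              ring
            · rw [rcd_groups, rcdCount]
              have hne : x ≠ y := fun h => hxy h.symm
              simp [List.takeWhile_cons, List.dropWhile_cons, hxy, hne, ih1 y]
              push_cast; ring
          · by_cases hxy : y = x
            · subst hxy
              rw [rcdCount]
              simp [List.dropWhile_cons, ih2 y]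
            · rw [rcdCount]
              have hne : x ≠ y := fun h => hxy h.symm
              simp [List.dropWhile_cons, hxy, hne, ih1 y]

-- ===== VERDICT (by name: the statement is the Claim_ definition above) =====
theorem remove_continuous_duplicates_spec : Claim_equal_remove_continuous_duplicates := by
  intro nums _
  unfold Spec_remove_continuous_duplicates remove_continuous_duplicates remove_continuous_duplicates_alt
  match nums with
  | [] => simp [rcd_groups]
  | x :: xs =>
      simp only [List.cons_ne_self, if_neg, reduceCtorEq, not_false_iff, ite_false]
      rw [rcd_loop_eq (x :: xs).length (x :: xs) 0 1 0 (by omega) (by omega)]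
      have h1 : (((x :: xs)[0]?).getD 0) = x := by simp
      have h2 : (x :: xs).drop 1 = xs := by simp
      rw [h1, h2, ((rcd_groups_eq xs.length xs (le_refl _)).1 x)]
      push_cast; ring
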